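-- pv_equiv track=rewrite | github.com/Brijeshlakkad/AI_Face_Mask_Detection | Project.py | split_test_set_by_category
-- ===== SOURCE A (Python) =====
-- def split_test_set_by_category(dataset, class_index, group):
--   """
--   Returns two datasets from spliting, based on the binary category it belongs to (e.g. Female/Male).
--   """
--   label_0, label_1 = group.keys()
--
--   test_0 = []
--   test_1 = []
--   for index, row in enumerate(dataset):
--     if row[class_index] == label_0:
--       test_0.append(index)
--     elif row[class_index] == label_1:
--       test_1.append(index)
--
--   return test_0, test_1
-- ===== SOURCE B (Python) =====
-- def split_test_set_by_category(dataset, class_index, group):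
--   """
--   Returns two datasets from spliting, based on the binary category it belongs to (e.g. Female/Male).
--   """
--   label_0, label_1 = group.keys()
--   test_0 = [index for index, row in enumerate(dataset) if row[class_index] == label_0]
--   test_1 = [index for index, row in enumerate(dataset) if row[class_index] == label_1]
--   return test_0, test_1
-- ===== Notes on version B (the rewrite author's own statement) =====
-- stated objective: simpler
-- what changed: Replaces the single stateful loop appending to two accumulator lists via if/elif with two independent filtering comprehensions over enumerate(dataset), one per label (correct because dict keys are distinct, so the elif exclusion is vacuous).
import Mathlib
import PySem

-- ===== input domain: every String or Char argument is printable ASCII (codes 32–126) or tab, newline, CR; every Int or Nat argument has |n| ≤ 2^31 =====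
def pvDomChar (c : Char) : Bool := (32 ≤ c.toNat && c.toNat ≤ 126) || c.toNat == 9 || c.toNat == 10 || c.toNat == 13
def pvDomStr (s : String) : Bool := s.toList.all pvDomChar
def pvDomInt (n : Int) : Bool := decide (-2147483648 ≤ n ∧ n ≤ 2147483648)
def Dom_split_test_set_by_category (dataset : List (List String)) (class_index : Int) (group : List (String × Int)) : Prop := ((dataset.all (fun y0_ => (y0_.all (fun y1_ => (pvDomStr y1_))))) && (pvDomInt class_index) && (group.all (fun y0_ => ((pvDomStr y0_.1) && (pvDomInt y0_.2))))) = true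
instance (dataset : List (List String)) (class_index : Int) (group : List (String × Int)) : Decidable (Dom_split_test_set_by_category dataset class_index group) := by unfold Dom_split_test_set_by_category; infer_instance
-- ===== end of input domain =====

-- Re-implementation B: two independent filtering passes over enumerate(dataset) (one per label)
-- instead of A's single if/elif loop with two accumulators; simpler, same O(n) cost.
-- ===== PORT A =====
def split_test_set_by_category (dataset : List (List String)) (class_index : Int) (group : List (String × Int)) : List Int × List Int :=
  match PySem.List.dedup (group.map Prod.fst) with
  | [label_0, label_1] =>
      (PySem.List.enumerate dataset).foldl (fun acc p =>
        if PySem.List.pyGetD p.2 class_index "" = label_0 then (acc.1 ++ [p.1], acc.2)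
        else if PySem.List.pyGetD p.2 class_index "" = label_1 then (acc.1, acc.2 ++ [p.1])
        else acc) ([], [])
  | _ => ([], [])  -- Python raises here (unpacking group.keys() into two names); excluded by Pre_

-- ===== PORT B =====
def split_test_set_by_category_alt (dataset : List (List String)) (class_index : Int) (group : List (String × Int)) : List Int × List Int :=
  let ks := PySem.List.dedup (group.map Prod.fst)
  if ks.length == 2 then
    -- label_0, label_1 = group.keys()
    let label_0 := ks.getD 0 ""
    let label_1 := ks.getD 1 ""
    (((PySem.List.enumerate dataset).filter (fun p => PySem.List.pyGetD p.2 class_index "" = label_0)).map Prod.fst,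
     ((PySem.List.enumerate dataset).filter (fun p => PySem.List.pyGetD p.2 class_index "" = label_1)).map Prod.fst)
  else ([], [])  -- Python raises here (ValueError on unpacking); outside Pre_

-- ===== PRECONDITION & SPEC =====
-- Pre_: the Python raises unless group has exactly two (distinct) keys and class_index is a
-- valid (possibly negative) Python index into every row.
def Pre_split_test_set_by_category (dataset : List (List String)) (class_index : Int) (group : List (String × Int)) : Prop :=
  (PySem.List.dedup (group.map Prod.fst)).length = 2 ∧
  ∀ row ∈ dataset, PySem.Raise.InRange row.length class_index
instance (dataset : List (List String)) (class_index : Int) (group : List (String × Int)) : Decidable (Pre_split_test_set_by_category dataset class_index group) := by unfold Pre_split_test_set_by_category; infer_instance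
def pvWitness_split_test_set_by_category : List (List String) × Int × (List (String × Int)) :=
  ([["a"], ["b"], ["c"]], 0, [("a", 1), ("b", 2)])

def Spec_split_test_set_by_category (dataset : List (List String)) (class_index : Int) (group : List (String × Int)) (out : List Int × List Int) : Prop := out = split_test_set_by_category_alt dataset class_index group
instance (dataset : List (List String)) (class_index : Int) (group : List (String × Int)) (out : List Int × List Int) : Decidable (Spec_split_test_set_by_category dataset class_index group out) := by unfold Spec_split_test_set_by_category; infer_instance

-- ===== CLAIM =====
def Claim_equal_split_test_set_by_category : Prop := ∀ (dataset : List (List String)) (class_index : Int) (group : List (String × Int)), Dom_split_test_set_by_category dataset class_index group → Pre_split_test_set_by_category dataset class_index group → Spec_split_test_set_by_category dataset class_index group (split_test_set_by_category dataset class_index group)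

-- ===== LEMMAS AND PROOFS =====
-- Loop invariant: A's fold over any prefix, started from accumulators (a0, a1), is those
-- accumulators extended by B's two filtered index lists (the elif is vacuous when l0 ≠ l1).
theorem pvFold_eq_filters (ci : Int) (l0 l1 : String) (hne : l0 ≠ l1) :
    ∀ (l : List (Int × List String)) (a0 a1 : List Int),
      l.foldl (fun acc p =>
        if PySem.List.pyGetD p.2 ci "" = l0 then (acc.1 ++ [p.1], acc.2)
        else if PySem.List.pyGetD p.2 ci "" = l1 then (acc.1, acc.2 ++ [p.1])
        else acc) (a0, a1)
      = (a0 ++ (l.filter (fun p => PySem.List.pyGetD p.2 ci "" = l0)).map Prod.fst,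
         a1 ++ (l.filter (fun p => PySem.List.pyGetD p.2 ci "" = l1)).map Prod.fst) := by
  intro l
  induction l with
  | nil => simp
  | cons p t ih =>
      intro a0 a1
      by_cases h0 : PySem.List.pyGetD p.2 ci "" = l0
      · have h1 : PySem.List.pyGetD p.2 ci "" ≠ l1 := by rw [h0]; exact hne
        simp [List.foldl_cons, h0, hne, ih]
      · by_cases h1 : PySem.List.pyGetD p.2 ci "" = l1
        · simp [List.foldl_cons, h1, Ne.symm hne, ih]
        · simp [List.foldl_cons, h0, h1, ih]

-- ===== VERDICT =====
theorem split_test_set_by_category_spec : Claim_equal_split_test_set_by_category := by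
  intro dataset class_index group _ hpre
  unfold Spec_split_test_set_by_category split_test_set_by_category split_test_set_by_category_alt
  have hnd := PySem.List.nodup_dedup (group.map Prod.fst)
  obtain ⟨hlen, -⟩ := hpre
  rcases hks : PySem.List.dedup (group.map Prod.fst) with - | ⟨l0, - | ⟨l1, - | -⟩⟩
  · rfl
  · rfl
  · rw [hks] at hnd
    have hne : l0 ≠ l1 := by simpa using (List.nodup_cons.mp hnd).1
    exact pvFold_eq_filters class_index l0 l1 hne (PySem.List.enumerate dataset) [] []
  · rfl
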